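-- pv_equiv track=rewrite | github.com/cptx032/cee | parser_utils.py | find_closing_brackets
-- ===== SOURCE A (Python) =====
-- import enum
--
-- class ParserState(enum.StrEnum):
--     SEARCHING = "searching"
--     POSSIBLE_COMMENT = "POSSIBLE_COMMENT"
--     INSIDE_MACRO = "INSIDE_MACRO"
--     INSIDE_ONE_LINE_COMMENT = "INSIDE_ONE_LINE_COMMENT"
--     INSIDE_MULTI_LINE_COMMENT = "INSIDE_MULTI_LINE_COMMENT"
--
-- def find_closing_brackets(source: str, start_brackets_position: int) -> int | None:
--     state = ParserState.SEARCHING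
--     last_char: str | None = None
--     brackets_level: int = 0
--
--     for pos, c in enumerate(
--         source[start_brackets_position + 1 :], start=start_brackets_position + 1
--     ):
--         match state:
--             case ParserState.SEARCHING:
--                 if c == "/":
--                     state = ParserState.POSSIBLE_COMMENT
--                 elif c == "#":
--                     state = ParserState.INSIDE_MACRO
--                 elif c == "{":
--                     brackets_level += 1
--                 elif c == "}":
--                     if brackets_level > 0:
--                         brackets_level -= 1
--                     else:
--                         return pos
--             case ParserState.POSSIBLE_COMMENT:
--                 if c == "/":
--                     state = ParserState.INSIDE_ONE_LINE_COMMENT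
--                 elif c == "*":
--                     state = ParserState.INSIDE_MULTI_LINE_COMMENT
--                 else:
--                     state = ParserState.SEARCHING
--             case ParserState.INSIDE_ONE_LINE_COMMENT:
--                 if c == "\n":
--                     state = ParserState.SEARCHING
--             case ParserState.INSIDE_MULTI_LINE_COMMENT:
--                 if c == "/" and last_char == "*":
--                     state = ParserState.SEARCHING
--             case ParserState.INSIDE_MACRO:
--                 if c == "\n":
--                     # fixme > handle multiline macros
--                     state = ParserState.SEARCHING
--         last_char = c
--     return None
-- ===== SOURCE B (Python) =====
-- def find_closing_brackets(source: str, start_brackets_position: int) -> int | None: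
--     n = len(source)
--     i = start_brackets_position + 1
--     if i < 0:
--         i = 0
--     depth = 0
--     while i < n:
--         c = source[i]
--         if c == '{':
--             depth += 1
--             i += 1
--         elif c == '}':
--             if depth > 0:
--                 depth -= 1
--                 i += 1
--             else:
--                 return i
--         elif c == '/':
--             nxt = source[i + 1] if i + 1 < n else None
--             if nxt == '/':
--                 j = i + 2
--                 while j < n and source[j] != '\n':
--                     j += 1
--                 if j >= n:
--                     return None
--                 i = j + 1
--             elif nxt == '*':
--                 k = i + 2
--                 while k < n and not (source[k] == '/' and source[k - 1] == '*'):
--                     k += 1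
--                 if k >= n:
--                     return None
--                 i = k + 1
--             else:
--                 i += 2
--         elif c == '#':
--             j = i + 1
--             while j < n and source[j] != '\n':
--                 j += 1
--             if j >= n:
--                 return None
--             i = j + 1
--         else:
--             i += 1
--     return None
-- ===== Notes on version B (the rewrite author's own statement) =====
-- stated objective: alternative
-- what changed: Replaced A's five-state per-character state machine (SEARCHING/POSSIBLE_COMMENT/comment/macro states threaded with last_char) by an index-based while loop over the source that keeps only the bracket depth and skips each //-comment, /*-comment or #-macro block with a dedicated inner search to its terminator, returning the real index; …
-- outside the precondition, e.g. on find_closing_brackets('}', -3): A returns -2, B returns 0; on find_closing_brackets('a}b', -5): A returns -3, B returns 1; on find_closing_brackets('{}', -3): A returns None, B returns None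
import Mathlib
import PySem

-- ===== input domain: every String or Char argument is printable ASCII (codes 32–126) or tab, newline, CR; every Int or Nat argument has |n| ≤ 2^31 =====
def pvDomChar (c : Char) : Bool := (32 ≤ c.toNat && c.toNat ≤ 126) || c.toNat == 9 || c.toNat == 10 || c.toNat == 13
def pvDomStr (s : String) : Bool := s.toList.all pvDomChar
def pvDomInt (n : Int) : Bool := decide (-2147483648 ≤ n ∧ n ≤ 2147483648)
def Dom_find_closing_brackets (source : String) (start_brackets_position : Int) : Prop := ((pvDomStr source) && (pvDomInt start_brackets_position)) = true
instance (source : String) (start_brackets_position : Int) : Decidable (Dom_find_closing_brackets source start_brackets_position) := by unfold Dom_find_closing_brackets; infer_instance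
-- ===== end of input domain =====

-- B replaces A's five-state per-character state machine by an index-based scan of the source
-- that skips each comment/macro block with one inner search (objective: alternative decomposition);
-- proved equal to A on Pre_ (scan start not a negative index, unless the source has no '}').

-- ===== PORT A =====
-- A's ParserState enum
inductive PvState
  | searching | possible | oneline | multiline | macroSt
deriving DecidableEq

-- the for-loop of A: one step per character, threading (state, last_char, brackets_level)
def goA : List Char → Int → PvState → Option Char → Int → Option Int
  | [], _, _, _, _ => none
  | c :: rest, pos, st, last, lvl =>
    match st with
    | .searching =>
      if c = '/' then goA rest (pos + 1) .possible (some c) lvl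
      else if c = '#' then goA rest (pos + 1) .macroSt (some c) lvl
      else if c = '{' then goA rest (pos + 1) .searching (some c) (lvl + 1)
      else if c = '}' then
        if lvl > 0 then goA rest (pos + 1) .searching (some c) (lvl - 1)
        else some pos
      else goA rest (pos + 1) .searching (some c) lvl
    | .possible =>
      if c = '/' then goA rest (pos + 1) .oneline (some c) lvl
      else if c = '*' then goA rest (pos + 1) .multiline (some c) lvl
      else goA rest (pos + 1) .searching (some c) lvl
    | .oneline =>
      if c = '\n' then goA rest (pos + 1) .searching (some c) lvl
      else goA rest (pos + 1) .oneline (some c) lvl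
    | .multiline =>
      if c = '/' ∧ last = some '*' then goA rest (pos + 1) .searching (some c) lvl
      else goA rest (pos + 1) .multiline (some c) lvl
    | .macroSt =>
      if c = '\n' then goA rest (pos + 1) .searching (some c) lvl
      else goA rest (pos + 1) .macroSt (some c) lvl

def find_closing_brackets (source : String) (start_brackets_position : Int) : Option Int :=
  goA (PySem.List.slice source.toList (some (start_brackets_position + 1)) none)
    (start_brackets_position + 1) .searching none 0

-- ===== PORT B =====
-- Source B inner while loop: first index ≥ j holding '\n' (None if none)
def pvFindNl (chars : List Char) (j : Nat) : Option Nat :=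
  if h : j < chars.length then
    if chars[j] = '\n' then some j else pvFindNl chars (j + 1)
  else none
termination_by chars.length - j

-- Source B inner while loop: first index ≥ k with chars[k]='/' preceded by '*' (None if none)
def pvFindClose (chars : List Char) (k : Nat) : Option Nat :=
  if h : k < chars.length then
    if chars[k] = '/' ∧ chars[k - 1]? = some '*' then some k else pvFindClose chars (k + 1)
  else none
termination_by chars.length - k

-- termination facts for goB, cited in its decreasing_by
theorem pvFindNl_ge (chars : List Char) (j k : Nat) (h : pvFindNl chars j = some k) :
    j ≤ k ∧ k < chars.length := by
  fun_induction pvFindNl chars j with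
  | case1 j hj hc => simp_all; omega
  | case2 j hj hc ih => have := ih h; omega
  | case3 j hj => simp_all

theorem pvFindClose_ge (chars : List Char) (j k : Nat) (h : pvFindClose chars j = some k) :
    j ≤ k ∧ k < chars.length := by
  fun_induction pvFindClose chars j with
  | case1 j hj hc => simp_all; omega
  | case2 j hj hc ih => have := ih h; omega
  | case3 j hj => simp_all

-- Source B main while loop over the source itself, index i, brackets depth
def goB (chars : List Char) (i : Nat) (depth : Int) : Option Int :=
  if h : i < chars.length then
    let c := chars[i]
    if c = '{' then goB chars (i + 1) (depth + 1)
    else if c = '}' then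
      if depth > 0 then goB chars (i + 1) (depth - 1)
      else some (i : Int)
    else if c = '/' then
      if chars[i + 1]? = some '/' then
        match h3 : pvFindNl chars (i + 2) with
        | none => none
        | some j => goB chars (j + 1) depth
      else if chars[i + 1]? = some '*' then
        match h3 : pvFindClose chars (i + 2) with
        | none => none
        | some k => goB chars (k + 1) depth
      else goB chars (i + 2) depth
    else if c = '#' then
      match h3 : pvFindNl chars (i + 1) with
      | none => none
      | some j => goB chars (j + 1) depth
    else goB chars (i + 1) depth
  else none
termination_by chars.length - i
decreasing_by
  all_goals first
    | omega
    | (have := pvFindNl_ge chars _ _ h3; omega)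
    | (have := pvFindClose_ge chars _ _ h3; omega)

def find_closing_brackets_alt (source : String) (start_brackets_position : Int) : Option Int :=
  let i := start_brackets_position + 1
  let i := if i < 0 then 0 else i
  goB source.toList i.toNat 0

-- ===== PRECONDITION & SPEC =====
-- Pre_ excludes the out-of-contract inputs whose scan start is a negative index and whose
-- source contains a closing brace: there Python slices from the wrapped tail while A keeps
-- numbering from the negative start, B scans from the beginning of the string, and neither
-- value is specified for such a corner; when the source has no closing brace at all both
-- sides agree (no match) and those inputs stay inside the claim.
def Pre_find_closing_brackets (source : String) (start_brackets_position : Int) : Prop :=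
  -1 ≤ start_brackets_position ∨ '}' ∉ source.toList
instance (source : String) (start_brackets_position : Int) : Decidable (Pre_find_closing_brackets source start_brackets_position) := by unfold Pre_find_closing_brackets; infer_instance
def pvWitness_find_closing_brackets : String × Int := ("a{b}c}", 0)
def Spec_find_closing_brackets (source : String) (start_brackets_position : Int) (out : Option Int) : Prop := out = find_closing_brackets_alt source start_brackets_position
instance (source : String) (start_brackets_position : Int) (out : Option Int) : Decidable (Spec_find_closing_brackets source start_brackets_position out) := by unfold Spec_find_closing_brackets; infer_instance

-- ===== CLAIM (what is proved, stated in full; the proofs are below) =====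
def Claim_equal_find_closing_brackets : Prop := ∀ (source : String) (start_brackets_position : Int), Dom_find_closing_brackets source start_brackets_position → Pre_find_closing_brackets source start_brackets_position → Spec_find_closing_brackets source start_brackets_position (find_closing_brackets source start_brackets_position)

-- ===== LEMMAS AND PROOFS =====

theorem goA_oneline (chars : List Char) (base : Int) :
    ∀ m j lvl last, chars.length - j ≤ m →
      goA (chars.drop j) (base + (j : Int)) .oneline last lvl =
        (match pvFindNl chars j with
         | none => none
         | some k =>
             goA (chars.drop (k + 1)) (base + ((k : Int) + 1)) .searching (some '\n') lvl) := by
  intro m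
  induction m with
  | zero =>
    intro j lvl last hj
    have hle : chars.length ≤ j := by omega
    rw [List.drop_eq_nil_of_le hle, pvFindNl, dif_neg (by omega)]
    simp [goA]
  | succ m ih =>
    intro j lvl last hj
    by_cases hlt : j < chars.length
    · rw [List.drop_eq_getElem_cons hlt, pvFindNl, dif_pos hlt]
      by_cases hc : chars[j] = '\n'
      · rw [if_pos hc]
        simp [goA, hc, add_assoc]
      · rw [if_neg hc]
        simp only [goA, if_neg hc]
        rw [show base + (j : Int) + 1 = base + (((j + 1 : Nat) : Int)) by push_cast; ring]
        exact ih (j + 1) lvl (some chars[j]) (by omega)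
    · have hle : chars.length ≤ j := by omega
      rw [List.drop_eq_nil_of_le hle, pvFindNl, dif_neg (by omega)]
      simp [goA]

theorem goA_macro (chars : List Char) (base : Int) :
    ∀ m j lvl last, chars.length - j ≤ m →
      goA (chars.drop j) (base + (j : Int)) .macroSt last lvl =
        (match pvFindNl chars j with
         | none => none
         | some k =>
             goA (chars.drop (k + 1)) (base + ((k : Int) + 1)) .searching (some '\n') lvl) := by
  intro m
  induction m with
  | zero =>
    intro j lvl last hj
    have hle : chars.length ≤ j := by omega
    rw [List.drop_eq_nil_of_le hle, pvFindNl, dif_neg (by omega)]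
    simp [goA]
  | succ m ih =>
    intro j lvl last hj
    by_cases hlt : j < chars.length
    · rw [List.drop_eq_getElem_cons hlt, pvFindNl, dif_pos hlt]
      by_cases hc : chars[j] = '\n'
      · rw [if_pos hc]
        simp [goA, hc, add_assoc]
      · rw [if_neg hc]
        simp only [goA, if_neg hc]
        rw [show base + (j : Int) + 1 = base + (((j + 1 : Nat) : Int)) by push_cast; ring]
        exact ih (j + 1) lvl (some chars[j]) (by omega)
    · have hle : chars.length ≤ j := by omega
      rw [List.drop_eq_nil_of_le hle, pvFindNl, dif_neg (by omega)]
      simp [goA]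

theorem goA_multiline (chars : List Char) (base : Int) :
    ∀ m j lvl p, chars.length - j ≤ m → chars[j - 1]? = some p →
      goA (chars.drop j) (base + (j : Int)) .multiline (some p) lvl =
        (match pvFindClose chars j with
         | none => none
         | some k =>
             goA (chars.drop (k + 1)) (base + ((k : Int) + 1)) .searching (some '/') lvl) := by
  intro m
  induction m with
  | zero =>
    intro j lvl p hj hp
    have hle : chars.length ≤ j := by omega
    rw [List.drop_eq_nil_of_le hle, pvFindClose, dif_neg (by omega)]
    simp [goA]
  | succ m ih =>
    intro j lvl p hj hp
    by_cases hlt : j < chars.length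
    · rw [List.drop_eq_getElem_cons hlt, pvFindClose, dif_pos hlt]
      by_cases hc : chars[j] = '/' ∧ p = '*'
      · have hcond : chars[j] = '/' ∧ chars[j - 1]? = some '*' := by
          refine ⟨hc.1, ?_⟩; rw [hp, hc.2]
        rw [if_pos hcond]
        have hcond' : chars[j] = '/' ∧ (some p : Option Char) = some '*' := by
          exact ⟨hc.1, by rw [hc.2]⟩
        simp [goA, hc.1, hc.2, add_assoc]
      · have hcond : ¬(chars[j] = '/' ∧ chars[j - 1]? = some '*') := by
          intro hx; exact hc ⟨hx.1, by rw [hp] at hx; exact Option.some_injective _ hx.2⟩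
        rw [if_neg hcond]
        have hcond' : ¬(chars[j] = '/' ∧ (some p : Option Char) = some '*') := by
          intro hx; exact hc ⟨hx.1, Option.some_injective _ hx.2⟩
        simp only [goA, if_neg hcond']
        rw [show base + (j : Int) + 1 = base + (((j + 1 : Nat) : Int)) by push_cast; ring]
        exact ih (j + 1) lvl chars[j] (by omega) (by simp [List.getElem?_eq_getElem hlt])
    · have hle : chars.length ≤ j := by omega
      rw [List.drop_eq_nil_of_le hle, pvFindClose, dif_neg (by omega)]
      simp [goA]

theorem goA_none (l : List Char) (hno : '}' ∉ l) :
    ∀ pos st last lvl, goA l pos st last lvl = none := by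
  induction l with
  | nil => intro pos st last lvl; simp [goA]
  | cons c rest ih =>
    intro pos st last lvl
    have hc : c ≠ '}' := fun h => hno (h ▸ List.mem_cons_self)
    have hrest : '}' ∉ rest := fun h => hno (List.mem_cons_of_mem _ h)
    cases st <;> simp only [goA] <;> split_ifs <;>
      first
        | exact absurd (by assumption) hc
        | exact ih hrest _ _ _ _

theorem goB_eq_goA (chars : List Char) :
    ∀ m i depth last, chars.length - i ≤ m →
      goB chars i depth =
        goA (chars.drop i) ((i : Nat) : Int) .searching last depth := by
  intro m
  induction m with
  | zero =>
    intro i depth last hi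
    have hle : chars.length ≤ i := by omega
    rw [goB, dif_neg (by omega), List.drop_eq_nil_of_le hle]
    simp [goA]
  | succ m ih =>
    intro i depth last hi
    by_cases hlt : i < chars.length
    · have hcast : ((i : Nat) : Int) + 1 = (((i + 1 : Nat)) : Int) := by push_cast; ring
      have hcast2 : ((i : Nat) : Int) + 1 + 1 = (((i + 2 : Nat)) : Int) := by push_cast; ring
      rw [goB, dif_pos hlt, List.drop_eq_getElem_cons hlt]
      by_cases h1 : chars[i] = '{'
      · simp only [goA, h1]
        simp only [reduceIte, Char.reduceEq]
        rw [hcast]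
        exact ih (i + 1) (depth + 1) _ (by omega)
      · by_cases h2 : chars[i] = '}'
        · by_cases hd : depth > 0
          · simp only [goA, h2]
            simp only [reduceIte, Char.reduceEq, if_pos hd]
            rw [hcast]
            exact ih (i + 1) (depth - 1) _ (by omega)
          · simp only [goA, h2]
            simp only [reduceIte, Char.reduceEq, if_neg hd]
        · by_cases h3 : chars[i] = '/'
          · simp only [goA, h3]
            simp only [reduceIte, Char.reduceEq]
            rcases hnx : chars[i + 1]? with _ | d
            · have hle2 : chars.length ≤ i + 1 := List.getElem?_eq_none_iff.mp hnx
              rw [if_neg (by simp), if_neg (by simp)]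
              rw [ih (i + 2) depth (some chars[i]) (by omega),
                List.drop_eq_nil_of_le (by omega), List.drop_eq_nil_of_le hle2]
              simp [goA]
            · have hlt2 : i + 1 < chars.length := (List.getElem?_eq_some_iff.mp hnx).1
              have hget2 : chars[i + 1] = d := by
                have h := List.getElem?_eq_getElem hlt2; rw [hnx] at h
                exact (Option.some_injective _ h).symm
              rw [List.drop_eq_getElem_cons hlt2, hget2]
              by_cases hd1 : d = '/'
              · rw [if_pos (show (some d : Option Char) = some '/' by rw [hd1])]
                simp only [goA, hd1]
                simp only [reduceIte, Char.reduceEq]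
                rw [hcast2]
                have hol := goA_oneline chars 0 chars.length (i + 2) depth (some '/') (by omega)
                simp only [zero_add] at hol
                rw [hol]
                rcases h4 : pvFindNl chars (i + 2) with _ | j
                · rfl
                · show goB chars (j + 1) depth =
                    goA (List.drop (j + 1) chars) ((j : Int) + 1)
                      PvState.searching (some '\n') depth
                  have hj := pvFindNl_ge chars (i + 2) j h4
                  rw [show ((j : Int) + 1) = (((j + 1 : Nat)) : Int) by push_cast; ring]
                  exact ih (j + 1) depth (some '\n') (by omega)
              · by_cases hd2 : d = '*'
                · rw [if_neg (by simp [hd1]),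
                    if_pos (show (some d : Option Char) = some '*' by rw [hd2])]
                  simp only [goA, hd2]
                  simp only [reduceIte, Char.reduceEq]
                  rw [hcast2]
                  have hml := goA_multiline chars 0 chars.length (i + 2) depth '*'
                    (by omega) (by simp [hnx, hd2])
                  simp only [zero_add] at hml
                  rw [hml]
                  rcases h4 : pvFindClose chars (i + 2) with _ | k
                  · rfl
                  · show goB chars (k + 1) depth =
                      goA (List.drop (k + 1) chars) ((k : Int) + 1)
                        PvState.searching (some '/') depth
                    have hk := pvFindClose_ge chars (i + 2) k h4
                    rw [show ((k : Int) + 1) = (((k + 1 : Nat)) : Int) by push_cast; ring]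
                    exact ih (k + 1) depth (some '/') (by omega)
                · rw [if_neg (by simp [hd1]), if_neg (by simp [hd2])]
                  simp only [goA]
                  rw [if_neg hd1, if_neg hd2]
                  rw [hcast2]
                  exact ih (i + 2) depth (some d) (by omega)
          · by_cases h4 : chars[i] = '#'
            · simp only [goA, h4]
              simp only [reduceIte, Char.reduceEq]
              rw [hcast]
              have hmc := goA_macro chars 0 chars.length (i + 1) depth (some '#') (by omega)
              simp only [zero_add] at hmc
              rw [hmc]
              rcases h5 : pvFindNl chars (i + 1) with _ | j
              · rfl
              · show goB chars (j + 1) depth =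
                  goA (List.drop (j + 1) chars) ((j : Int) + 1)
                    PvState.searching (some '\n') depth
                have hj := pvFindNl_ge chars (i + 1) j h5
                rw [show ((j : Int) + 1) = (((j + 1 : Nat)) : Int) by push_cast; ring]
                exact ih (j + 1) depth (some '\n') (by omega)
            · simp only [goA, h1, h2, h3, h4]
              simp only [if_false]
              rw [hcast]
              exact ih (i + 1) depth _ (by omega)
    · have hle : chars.length ≤ i := by omega
      rw [goB, dif_neg (by omega), List.drop_eq_nil_of_le hle]
      simp [goA]

-- ===== VERDICT (by name: the statement is the Claim_ definition above) =====
theorem find_closing_brackets_spec : Claim_equal_find_closing_brackets := by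
  intro source p _ hpre
  unfold Spec_find_closing_brackets find_closing_brackets find_closing_brackets_alt
  by_cases hb : p + 1 < 0
  · have hno : '}' ∉ source.toList := by
      rcases hpre with h | h
      · omega
      · exact h
    show _ = goB source.toList (if p + 1 < 0 then (0 : Int) else p + 1).toNat 0
    rw [if_pos hb]
    rw [goA_none _ (fun hm => hno (PySem.List.mem_of_mem_slice _ _ _ hm)),
      goB_eq_goA source.toList source.toList.length _ 0 none (by omega),
      goA_none _ (fun hm => hno (List.mem_of_mem_drop hm))]
  · show _ = goB source.toList (if p + 1 < 0 then (0 : Int) else p + 1).toNat 0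
    rw [if_neg hb]
    rw [PySem.List.slice_from source.toList (a := p + 1) (by omega),
      goB_eq_goA source.toList source.toList.length _ 0 none (by omega),
      Int.toNat_of_nonneg (by omega)]
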